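-- pv_equiv track=rewrite | github.com/nguyenchiemminhvu/DSA | Problems/Leetcode/FindMinimumLogTransportationCost/solve.py | minCuttingCost
-- ===== SOURCE A (Python) =====
-- def minCuttingCost(n: int, m: int, k: int) -> int:
--     arr = sorted([m, n], reverse=True)
--     cost = 0
--     for val in arr:
--         if val <= k:
--             break
--         cost += (val - k) * k
--     return cost
-- ===== SOURCE B (Python) =====
-- def minCuttingCost(n: int, m: int, k: int) -> int:
--     # Identity: max(0, a) + max(0, b) == max(0, a, b, a + b), so the total
--     # over-length above k is the largest of four linear forms; one max call,
--     # no sort, no loop, no per-log decomposition.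
--     return k * max(0, n - k, m - k, n + m - 2 * k)
-- ===== Notes on version B (the rewrite author's own statement) =====
-- stated objective: alternative
-- what changed: Replaced the descending sort plus accumulator loop with early break by a single maximum of four linear forms, using the identity max(0,a)+max(0,b)=max(0,a,b,a+b) so no ordering, per-log decomposition or iteration remains.
import Mathlib
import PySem

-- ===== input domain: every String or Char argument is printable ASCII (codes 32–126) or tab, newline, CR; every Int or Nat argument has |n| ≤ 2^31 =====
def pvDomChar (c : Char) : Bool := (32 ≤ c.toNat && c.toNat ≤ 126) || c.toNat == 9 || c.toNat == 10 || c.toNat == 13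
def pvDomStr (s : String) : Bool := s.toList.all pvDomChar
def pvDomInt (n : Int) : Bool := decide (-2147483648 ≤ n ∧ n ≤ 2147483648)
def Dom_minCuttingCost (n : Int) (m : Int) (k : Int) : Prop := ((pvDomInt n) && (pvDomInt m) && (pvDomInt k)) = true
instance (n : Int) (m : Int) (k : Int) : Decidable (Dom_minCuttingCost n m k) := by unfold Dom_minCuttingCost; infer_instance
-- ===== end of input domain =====

-- B replaces A's sort + accumulator loop with early break by one maximum of four
-- linear forms, via max(0,a)+max(0,b) = max(0,a,b,a+b) (alternative formulation).

-- ===== PORT A =====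
-- the 'for val in arr' loop with its break, carrying the accumulator 'cost'
def minCuttingCostLoop (k : Int) : List Int → Int → Int
  | [], cost => cost
  | val :: rest, cost =>
      if val ≤ k then cost
      else minCuttingCostLoop k rest (cost + (val - k) * k)

def minCuttingCost (n : Int) (m : Int) (k : Int) : Int :=
  let arr := PySem.List.sorted [m, n] (fun x => x) true
  minCuttingCostLoop k arr 0

-- ===== PORT B =====
-- Python's max(0, n-k, m-k, n+m-2*k) folds left: max(max(max(0, n-k), m-k), n+m-2k)
def minCuttingCost_alt (n : Int) (m : Int) (k : Int) : Int :=
  k * max (max (max 0 (n - k)) (m - k)) (n + m - 2 * k)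

-- ===== PRECONDITION & SPEC =====
def Spec_minCuttingCost (n : Int) (m : Int) (k : Int) (out : Int) : Prop := out = minCuttingCost_alt n m k
instance (n : Int) (m : Int) (k : Int) (out : Int) : Decidable (Spec_minCuttingCost n m k out) := by unfold Spec_minCuttingCost; infer_instance

-- ===== CLAIM (what is proved, stated in full; the proofs are below) =====
def Claim_equal_minCuttingCost : Prop := ∀ (n : Int) (m : Int) (k : Int), Dom_minCuttingCost n m k → Spec_minCuttingCost n m k (minCuttingCost n m k)

-- ===== LEMMAS AND PROOFS =====

-- the descending sort of a two-element list, named explicitly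
lemma sorted2_desc (m n : Int) :
    PySem.List.sorted [m, n] (fun x => x) true = if m < n then [n, m] else [m, n] := by
  split_ifs with h
  · exact PySem.List.sorted_rev_eq_of_perm_of_pairwise_gt [m, n] [n, m] (fun x => x)
      (List.Perm.swap m n []) (by simpa using h)
  · exact PySem.List.sorted_rev_eq_self_of_pairwise [m, n] (fun x => x)
      (by simpa using Int.not_lt.mp h)

-- the loop on an explicit descending pair equals B's max-of-linear-forms
lemma loop_pair (a b k : Int) (hba : b ≤ a) :
    minCuttingCostLoop k [a, b] 0 = k * max (max (max 0 (a - k)) (b - k)) (a + b - 2 * k) := by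
  simp only [minCuttingCostLoop]
  split_ifs with h1 h2
  · have hmx : max (max (max 0 (a - k)) (b - k)) (a + b - 2 * k) = 0 := by omega
    rw [hmx]; ring
  · have hmx : max (max (max 0 (a - k)) (b - k)) (a + b - 2 * k) = a - k := by omega
    rw [hmx]; ring
  · have hmx : max (max (max 0 (a - k)) (b - k)) (a + b - 2 * k) = a + b - 2 * k := by omega
    rw [hmx]; ring

-- ===== VERDICT (by name: the statement is the Claim_ definition above) =====
theorem minCuttingCost_spec : Claim_equal_minCuttingCost := by
  intro n m k _
  unfold Spec_minCuttingCost minCuttingCost minCuttingCost_alt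
  rw [sorted2_desc]
  split_ifs with h
  · rw [loop_pair n m k (le_of_lt h)]
  · rw [loop_pair m n k (Int.not_lt.mp h)]
    have hmx : max (max (max 0 (m - k)) (n - k)) (m + n - 2 * k)
             = max (max (max 0 (n - k)) (m - k)) (n + m - 2 * k) := by omega
    rw [hmx]
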